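-- pv_equiv track=rewrite | github.com/wilqor/IWI-AKE | AKE.py | clusterize
-- ===== SOURCE A (Python) =====
-- import collections
--
-- def clusterize(keyphrases):
--     phrases = [p[0] for p in keyphrases]
--     flat = ' '.join(phrases).split()
--     counter = collections.Counter(flat)
--     clusters = [c for c in counter.keys() if len(c) > 1 and counter[c] >= 1]
--
--     result = {}
--
--     for cluster_name in clusters:
--         result[cluster_name] = []
--         for phrase in phrases:
--             if cluster_name in phrase:
--                 result[cluster_name].append(phrase)
--
--     return result
-- ===== SOURCE B (Python) =====
-- def clusterize(keyphrases):
--     # Different algorithm: instead of testing each word against each phrase with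
--     # `word in phrase`, enumerate every substring of length >= 2 of each phrase
--     # once and look it up in a hash map of the words; each phrase is handled in
--     # a single pass and appended (at most once, via `seen`) in phrase order.
--     phrases = [p[0] for p in keyphrases]
--     words = {}
--     for w in ' '.join(phrases).split():
--         if len(w) > 1:
--             words[w] = []
--     for phrase in phrases:
--         seen = set()
--         n = len(phrase)
--         for i in range(n - 1):
--             for j in range(i + 2, n + 1):
--                 s = phrase[i:j]
--                 if s in words and s not in seen:
--                     words[s].append(phrase)
--                     seen.add(s)
--     return words
-- ===== Notes on version B (the rewrite author's own statement) =====
-- stated objective: alternative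
-- what changed: A tests every distinct word against every phrase with a substring scan ('word in phrase'); B never runs a substring search: it builds a hash map word->list once and, for each phrase, enumerates its substrings of length >= 2 and looks each up in the map (with a 'seen' set to append the phrase at most once per word), appending in phrase order.
import Mathlib
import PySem

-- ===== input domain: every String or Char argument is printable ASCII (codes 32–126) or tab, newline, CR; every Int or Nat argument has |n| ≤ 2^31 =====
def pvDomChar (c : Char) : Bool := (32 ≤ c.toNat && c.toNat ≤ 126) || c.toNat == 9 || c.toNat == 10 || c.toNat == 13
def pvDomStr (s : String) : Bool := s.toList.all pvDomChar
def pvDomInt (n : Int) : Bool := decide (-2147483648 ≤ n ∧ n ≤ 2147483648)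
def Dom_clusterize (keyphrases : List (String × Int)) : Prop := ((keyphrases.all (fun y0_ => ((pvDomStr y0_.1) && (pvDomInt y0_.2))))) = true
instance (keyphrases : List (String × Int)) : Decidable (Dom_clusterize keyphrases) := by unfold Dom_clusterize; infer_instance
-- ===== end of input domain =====

-- B replaces A's per-word substring scan over phrases by enumerating each phrase's length-≥2 substrings once and looking them up in a word map (alternative algorithm, similar cost).


-- ===== PORT A =====
def clusterize (keyphrases : List (String × Int)) : List (String × List String) :=
  let phrases := keyphrases.map (·.1)
  let flat := PySem.Str.split₀ (PySem.Str.join " " phrases)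
  let counter := PySem.Dict.counter flat
  let clusters := counter.keys.filter (fun c => decide (1 < PySem.Str.len c) && decide ((1 : Int) ≤ counter.getD c 0))
  let result := clusters.foldl (fun d cname =>
    phrases.foldl (fun d phrase =>
        if PySem.Str.isIn cname phrase then d.modify cname [] (· ++ [phrase]) else d)
      (d.insert cname []))
    PySem.Dict.empty
  result.items

-- ===== PORT B =====
-- 'if s in words and s not in seen: words[s].append(phrase); seen.add(s)'
def pvMark (phrase : String) (st : PySem.Dict String (List String) × PySem.Set String) (s : String) :
    PySem.Dict String (List String) × PySem.Set String :=
  if st.1.contains s && !(PySem.Set.contains st.2 s) then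
    (st.1.modify s [] (· ++ [phrase]), st.2.add s)
  else st

-- the body of B's outer loop: enumerate the substrings phrase[i:j] of length ≥ 2
def pvPhraseStep (words : PySem.Dict String (List String)) (phrase : String) :
    PySem.Dict String (List String) :=
  let n := PySem.Str.len phrase
  ((PySem.List.pyRange 0 (n - 1)).foldl (fun st i =>
      (PySem.List.pyRange (i + 2) (n + 1)).foldl (fun st j =>
        pvMark phrase st (PySem.Str.slice phrase (some i) (some j))) st)
    (words, (PySem.Set.empty : PySem.Set String))).1

def clusterize_alt (keyphrases : List (String × Int)) : List (String × List String) :=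
  let phrases := keyphrases.map (·.1)
  let words := (PySem.Str.split₀ (PySem.Str.join " " phrases)).foldl
      (fun d w => if decide (1 < PySem.Str.len w) then d.insert w ([] : List String) else d)
      PySem.Dict.empty
  (phrases.foldl pvPhraseStep words).items

-- ===== PRECONDITION & SPEC =====
def Spec_clusterize (keyphrases : List (String × Int)) (out : List (String × List String)) : Prop := out = clusterize_alt keyphrases
instance (keyphrases : List (String × Int)) (out : List (String × List String)) : Decidable (Spec_clusterize keyphrases out) := by unfold Spec_clusterize; infer_instance

-- ===== CLAIM (what is proved, stated in full; the proofs are below) =====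
def Claim_equal_clusterize : Prop := ∀ (keyphrases : List (String × Int)), Dom_clusterize keyphrases → Spec_clusterize keyphrases (clusterize keyphrases)

-- ===== LEMMAS AND PROOFS =====

-- A's inner loop over phrases, with key c freshly overwritten, is an insert of the filtered phrase list.
theorem clusterizeA_inner (c : String) (phrases : List String) (d : PySem.Dict String (List String)) (acc : List String) :
    phrases.foldl (fun d phrase =>
        if PySem.Str.isIn c phrase then d.modify c [] (· ++ [phrase]) else d)
      (d.insert c acc)
    = d.insert c (acc ++ phrases.filter (fun p => PySem.Str.isIn c p)) := by
  induction phrases generalizing acc with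
  | nil => simp
  | cons p ps ih =>
    simp only [List.foldl_cons, List.filter_cons]
    by_cases h : PySem.Str.isIn c p = true
    · rw [if_pos h]
      have hm : (d.insert c acc).modify c [] (· ++ [p]) = d.insert c (acc ++ [p]) := by
        simp [PySem.Dict.modify, PySem.Dict.getD_insert_self, PySem.Dict.insert_insert_self]
      rw [hm, ih]
      simp only [PySem.Str.isIn_eq] at h
      simp [h]
    · rw [if_neg h, ih]
      simp only [PySem.Str.isIn_eq] at h
      simp [h]

-- ordered dedup commutes with filter
theorem pvDedupFilter (p : String → Bool) (l : List String) :
    PySem.List.dedup (l.filter p) = (PySem.List.dedup l).filter p := by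
  simp only [PySem.List.dedup_eq_ofList]
  induction l with
  | nil => rfl
  | cons x xs ih =>
    by_cases hp : p x = true
    · rw [List.filter_cons_of_pos hp, PySem.Set.ofList_cons, PySem.Set.ofList_cons, ih]
      show x :: ((PySem.Set.ofList xs).filter p).filter (fun y => !(y == x))
          = (x :: ((PySem.Set.ofList xs).filter (fun y => !(y == x)))).filter p
      rw [List.filter_cons_of_pos hp, List.filter_filter, List.filter_filter]
      exact congrArg _ (List.filter_congr (fun a _ => Bool.and_comm _ _))
    · rw [List.filter_cons_of_neg hp, PySem.Set.ofList_cons, ih]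
      show ((PySem.Set.ofList xs)).filter p
          = (x :: ((PySem.Set.ofList xs).filter (fun y => !(y == x)))).filter p
      rw [List.filter_cons_of_neg hp, List.filter_filter]
      refine List.filter_congr (fun a _ => ?_)
      by_cases ha : a == x
      · have : a = x := eq_of_beq ha
        simp [this, hp]
      · simp [ha]

theorem pvItemsEmpty : (PySem.Dict.empty : PySem.Dict String (List String)).items = [] := rfl

-- the initial dict {w: [] for w if len>1}: all values stay []
theorem pvInsVals (l : List String) (d : PySem.Dict String (List String))
    (h : ∀ q ∈ d.items, q.2 = ([] : List String)) :
    ∀ q ∈ (l.foldl (fun d w => d.insert w ([] : List String)) d).items, q.2 = ([] : List String) := by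
  induction l generalizing d with
  | nil => exact h
  | cons w ws ih =>
    intro q hq
    refine ih (d.insert w []) ?_ q hq
    intro r hr
    rcases (PySem.Dict.mem_items_insert d w [] r).mp hr with h1 | h2
    · rw [h1]
    · exact h r h2.1

-- the initial dict as a list of items
theorem pvInsItems (l : List String) :
    ((l.foldl (fun d w => d.insert w ([] : List String)) PySem.Dict.empty)).items
      = (PySem.List.dedup l).map (fun w => (w, ([] : List String))) := by
  set D := l.foldl (fun d w => d.insert w ([] : List String)) PySem.Dict.empty with hD
  have hkeys : D.keys = PySem.Set.ofList l := by
    rw [hD, PySem.Dict.keys_foldl_insert (f := fun _ _ => ([] : List String))]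
    simp [PySem.Dict.keys_empty]
    rfl
  have hnd : D.keys.Nodup := by rw [hkeys]; exact PySem.Set.nodup_ofList l
  have hvals : ∀ q ∈ D.items, q.2 = ([] : List String) := by
    rw [hD]
    exact pvInsVals l PySem.Dict.empty (by rw [pvItemsEmpty]; intro q hq; cases hq)
  rw [PySem.Dict.items_eq_map_keys D hnd [], hkeys, PySem.List.dedup_eq_ofList]
  refine List.map_congr_left (fun k hk => ?_)
  have hk' : k ∈ D.keys := by rw [hkeys]; exact hk
  have : ∃ q ∈ D.items, q.1 = k := by
    simpa [PySem.Dict.keys] using hk'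
  rcases this with ⟨q, hq, hq1⟩
  have hv : q.2 = ([] : List String) := hvals q hq
  have : (k, ([] : List String)) ∈ D.items := by
    have : q = (k, ([] : List String)) := by
      cases q; simp_all
    rwa [this] at hq
  rw [PySem.Dict.getD_of_mem_items D this hnd []]

-- B's substring enumeration of one phrase, as a flat list
def pvSubs (phrase : String) : List String :=
  (PySem.List.pyRange 0 (PySem.Str.len phrase - 1)).flatMap (fun i =>
    (PySem.List.pyRange (i + 2) (PySem.Str.len phrase + 1)).map (fun j =>
      PySem.Str.slice phrase (some i) (some j)))

theorem pvPhraseStep_eq (d : PySem.Dict String (List String)) (phrase : String) :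
    pvPhraseStep d phrase = ((pvSubs phrase).foldl (pvMark phrase) (d, (PySem.Set.empty : PySem.Set String))).1 := by
  unfold pvPhraseStep pvSubs
  rw [List.flatMap_def, List.foldl_flatten, List.foldl_map]
  simp only [List.foldl_map]

-- pvSubs phrase holds exactly the length-≥2 infixes of phrase
theorem pvMemSubs (k phrase : String) (hk : 2 ≤ k.toList.length) :
    k ∈ pvSubs phrase ↔ PySem.Str.isIn k phrase = true := by
  have hn : PySem.Str.len phrase = (phrase.toList.length : Int) := PySem.Str.len_eq phrase
  rw [PySem.Str.isIn_iff_infix]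
  unfold pvSubs
  constructor
  · intro h
    rcases List.mem_flatMap.mp h with ⟨i, hi, hk2⟩
    rcases List.mem_map.mp hk2 with ⟨j, hj, rfl⟩
    rcases PySem.List.mem_pyRange_one.mp hi with ⟨hi0, _⟩
    rcases PySem.List.mem_pyRange_one.mp hj with ⟨hij, _⟩
    have hj0 : 0 ≤ j := by omega
    rw [PySem.Str.toList_slice, PySem.Chars.slice_eq_listSlice]
    have hi' : i = ((i.toNat : Nat) : Int) := by omega
    have hj' : j = ((j.toNat : Nat) : Int) := by omega
    rw [hi', hj', PySem.List.slice_natCast]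
    exact ⟨phrase.toList.take i.toNat, (phrase.toList.drop i.toNat).drop (j.toNat - i.toNat), by
      rw [List.append_assoc, List.take_append_drop, List.take_append_drop]⟩
  · intro h
    rcases h with ⟨pre, suf, heq⟩
    have hlen : pre.length + (k.toList.length + suf.length) = phrase.toList.length := by
      have := congrArg List.length heq
      simpa using this
    refine List.mem_flatMap.mpr ⟨((pre.length : Nat) : Int), ?_, ?_⟩
    · refine PySem.List.mem_pyRange_one.mpr ⟨by positivity, ?_⟩
      rw [hn]; push_cast; omega
    · refine List.mem_map.mpr ⟨(((pre.length + k.toList.length : Nat) : Nat) : Int), ?_, ?_⟩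
      · refine PySem.List.mem_pyRange_one.mpr ⟨by omega, ?_⟩
        rw [hn]; push_cast; omega
      · apply String.toList_inj.mp
        rw [PySem.Str.toList_slice, PySem.Chars.slice_eq_listSlice, PySem.List.slice_natCast]
        rw [← heq, List.append_assoc, List.drop_left, Nat.add_sub_cancel_left, List.take_left]

-- Set.contains is membership
theorem pvSetContains (s : PySem.Set String) (x : String) :
    PySem.Set.contains s x = true ↔ x ∈ s := by
  show List.elem x s = true ↔ x ∈ s
  exact List.elem_iff

-- the fold of pvMark over any substring list, at the items level
theorem pvMarkFold (phrase : String) (S : List String) (d : PySem.Dict String (List String))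
    (seen : PySem.Set String) (hnd : d.keys.Nodup) :
    ((S.foldl (pvMark phrase) (d, seen)).1).items
      = d.items.map (fun q => if q.1 ∈ S ∧ q.1 ∉ seen then (q.1, q.2 ++ [phrase]) else q) := by
  induction S generalizing d seen with
  | nil => simp
  | cons s S' ih =>
    simp only [List.foldl_cons]
    by_cases hc : d.contains s = true
    · by_cases hs : s ∈ seen
      · have hcond : pvMark phrase (d, seen) s = (d, seen) := by
          have h1 : PySem.Set.contains seen s = true := (pvSetContains seen s).mpr hs
          unfold pvMark
          rw [h1]
          simp
        rw [hcond, ih d seen hnd]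
        refine List.map_congr_left (fun q _ => ?_)
        by_cases hq1 : q.1 = s
        · simp [hq1, hs]
        · simp [List.mem_cons, hq1]
      · have hcond : pvMark phrase (d, seen) s
            = (d.modify s [] (· ++ [phrase]), seen.add s) := by
          have h1 : PySem.Set.contains seen s = false := by
            rw [Bool.eq_false_iff]
            intro hco; exact hs ((pvSetContains seen s).mp hco)
          unfold pvMark
          rw [h1, hc]
          simp
        rw [hcond]
        have hmod : (d.modify s [] (· ++ [phrase])).items
            = d.items.map (fun pq => if pq.1 == s then (s, d.getD s [] ++ [phrase]) else pq) := by
          show (d.insert s (d.getD s [] ++ [phrase])).items = _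
          exact PySem.Dict.items_insert_of_contains d _ hc
        have hkeys : (d.modify s [] (· ++ [phrase])).keys = d.keys := by
          show (d.modify s [] (· ++ [phrase])).items.map (·.1) = d.items.map (·.1)
          rw [hmod, List.map_map]
          refine List.map_congr_left (fun q _ => ?_)
          by_cases hq1 : q.1 = s <;> simp [hq1]
        rw [ih _ _ (by rw [hkeys]; exact hnd), hmod, List.map_map]
        refine List.map_congr_left (fun q hq => ?_)
        obtain ⟨q1, q2⟩ := q
        by_cases hq1 : q1 = s
        · subst hq1
          have hgd : d.getD q1 [] = q2 := PySem.Dict.getD_of_mem_items d hq hnd []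
          have hadd : q1 ∈ seen.add q1 := (PySem.Set.mem_add seen q1 q1).mpr (Or.inr rfl)
          simp only [Function.comp_def, beq_self_eq_true, if_true, hgd]
          rw [if_neg (fun hcon => hcon.2 hadd), if_pos ⟨List.mem_cons_self, hs⟩]
        · have hne : (q1 == s) = false := by simpa using hq1
          simp only [Function.comp_def, hne, Bool.false_eq_true, if_false]
          have hmemadd : q1 ∈ seen.add s ↔ q1 ∈ seen := by
            rw [PySem.Set.mem_add]
            exact ⟨fun h => h.elim id (fun h' => absurd h' hq1), Or.inl⟩
          by_cases hq2 : q1 ∈ S' ∧ q1 ∉ seen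
          · rw [if_pos ⟨hq2.1, by rw [hmemadd]; exact hq2.2⟩,
                if_pos ⟨List.mem_cons_of_mem s hq2.1, hq2.2⟩]
          · rw [if_neg (by rw [hmemadd]; exact hq2),
                if_neg (by
                  intro hcon
                  exact hq2 ⟨(List.mem_cons.mp hcon.1).resolve_left hq1, hcon.2⟩)]
    · have hc' : d.contains s = false := eq_false_of_ne_true hc
      have hcond : pvMark phrase (d, seen) s = (d, seen) := by
        unfold pvMark; rw [hc']; simp
      rw [hcond, ih d seen hnd]
      refine List.map_congr_left (fun q hq => ?_)
      have hq1 : q.1 ≠ s := by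
        intro hcon
        have : q.1 ∈ d.keys := PySem.Dict.mem_keys_of_mem_items d hq
        rw [PySem.Dict.contains_eq_decide_mem_keys] at hc'
        exact (by simpa using hc' : s ∉ d.keys) (hcon ▸ this)
      simp [List.mem_cons, hq1]

-- one phrase of B's main loop, at the items level
theorem pvStepItems (d : PySem.Dict String (List String)) (phrase : String)
    (hnd : d.keys.Nodup) (hlen : ∀ k ∈ d.keys, 2 ≤ k.toList.length) :
    (pvPhraseStep d phrase).items
      = d.items.map (fun q => if PySem.Str.isIn q.1 phrase then (q.1, q.2 ++ [phrase]) else q) := by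
  rw [pvPhraseStep_eq, pvMarkFold phrase _ d _ hnd]
  refine List.map_congr_left (fun q hq => ?_)
  have hk : q.1 ∈ d.keys := PySem.Dict.mem_keys_of_mem_items d hq
  have hmem : q.1 ∈ pvSubs phrase ↔ PySem.Str.isIn q.1 phrase = true :=
    pvMemSubs q.1 phrase (hlen q.1 hk)
  have hemp : q.1 ∉ (PySem.Set.empty : PySem.Set String) := by
    intro hcon; exact absurd hcon (List.not_mem_nil)
  by_cases h : PySem.Str.isIn q.1 phrase = true
  · rw [if_pos ⟨hmem.mpr h, hemp⟩, if_pos h]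
  · rw [if_neg (fun hcon => h (hmem.mp hcon.1)), if_neg h]

theorem pvStepKeys (d : PySem.Dict String (List String)) (phrase : String)
    (hnd : d.keys.Nodup) (hlen : ∀ k ∈ d.keys, 2 ≤ k.toList.length) :
    (pvPhraseStep d phrase).keys = d.keys := by
  show (pvPhraseStep d phrase).items.map (·.1) = d.items.map (·.1)
  rw [pvStepItems d phrase hnd hlen, List.map_map]
  refine List.map_congr_left (fun q _ => ?_)
  by_cases h : PySem.Str.isIn q.1 phrase = true <;>
    · simp only [PySem.Str.isIn_eq] at h
      simp [h]

-- B's main loop over the phrases, at the items level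
theorem pvPhrasesFold (phrases : List String) (d : PySem.Dict String (List String))
    (hnd : d.keys.Nodup) (hlen : ∀ k ∈ d.keys, 2 ≤ k.toList.length) :
    (phrases.foldl pvPhraseStep d).items
      = d.items.map (fun q => (q.1, q.2 ++ phrases.filter (fun p => PySem.Str.isIn q.1 p))) := by
  induction phrases generalizing d with
  | nil => simp
  | cons p ps ih =>
    simp only [List.foldl_cons]
    have hkeys := pvStepKeys d p hnd hlen
    rw [ih (pvPhraseStep d p) (by rw [hkeys]; exact hnd) (by rw [hkeys]; exact hlen),
        pvStepItems d p hnd hlen, List.map_map]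
    refine List.map_congr_left (fun q _ => ?_)
    by_cases h : PySem.Str.isIn q.1 p = true <;>
      · simp only [PySem.Str.isIn_eq] at h
        simp [h]

-- ===== VERDICT (by name: the statement is the Claim_ definition above) =====
theorem clusterize_spec : Claim_equal_clusterize := by
  intro keyphrases _
  unfold Spec_clusterize clusterize clusterize_alt
  simp only []
  set phrases := keyphrases.map (·.1) with hph
  set flat := PySem.Str.split₀ (PySem.Str.join " " phrases) with hflat
  -- A's cluster list equals B's word list
  have hclusters :
      (PySem.Dict.counter flat).keys.filter
        (fun c => decide (1 < PySem.Str.len c) && decide ((1 : Int) ≤ (PySem.Dict.counter flat).getD c 0))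
      = (PySem.List.dedup flat).filter (fun w => decide (1 < PySem.Str.len w)) := by
    rw [PySem.Dict.keys_counter, ← PySem.List.dedup_eq_ofList]
    apply List.filter_congr
    intro c hc
    have hmem : c ∈ flat := (PySem.List.mem_dedup flat c).1 hc
    have hcount : (1 : Int) ≤ (PySem.Dict.counter flat).getD c 0 := by
      rw [PySem.Dict.getD_counter]
      exact_mod_cast List.one_le_count_iff.2 hmem
    rw [decide_eq_true hcount, Bool.and_true]
  rw [hclusters]
  set ws := (PySem.List.dedup flat).filter (fun w => decide (1 < PySem.Str.len w)) with hws
  have hnd : ws.Nodup := (PySem.List.nodup_dedup flat).filter _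
  -- A's outer loop: each cluster step is an insert of the full filtered list
  have hA : ws.foldl (fun d cname =>
      phrases.foldl (fun d phrase =>
          if PySem.Str.isIn cname phrase then d.modify cname [] (· ++ [phrase]) else d)
        (d.insert cname []))
      PySem.Dict.empty
    = ws.foldl (fun d cname => d.insert cname (phrases.filter (fun p => PySem.Str.isIn cname p)))
      PySem.Dict.empty := by
    apply PySem.List.foldl_congr_mem
    intro d c _
    rw [clusterizeA_inner]
    simp
  rw [hA]
  have hfresh : (ws.foldl (fun d cname => d.insert cname (phrases.filter (fun p => PySem.Str.isIn cname p)))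
      PySem.Dict.empty).items
      = (PySem.Dict.empty : PySem.Dict String (List String)).items
        ++ ws.map (fun c => (c, phrases.filter (fun p => PySem.Str.isIn c p))) := by
    apply PySem.Dict.items_foldl_insert_fresh (k := fun c => c)
    · intro a _; exact PySem.Dict.contains_empty a
    · simpa using hnd
  rw [hfresh]
  -- B's side
  set D0 := flat.foldl (fun d w => if decide (1 < PySem.Str.len w) then d.insert w ([] : List String) else d) PySem.Dict.empty with hD0
  have hD0' : D0.items = ws.map (fun w => (w, ([] : List String))) := by
    rw [hD0, PySem.List.foldl_if_eq_foldl_filter, pvInsItems, pvDedupFilter]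
  have hD0keys : D0.keys = ws := by
    show D0.items.map (·.1) = ws
    rw [hD0']; simp [Function.comp_def]
  have hndD0 : D0.keys.Nodup := by rw [hD0keys]; exact hnd
  have hlenD0 : ∀ k ∈ D0.keys, 2 ≤ k.toList.length := by
    rw [hD0keys]
    intro k hk
    have := List.of_mem_filter hk
    have hlt : 1 < PySem.Str.len k := of_decide_eq_true this
    rw [PySem.Str.len_eq] at hlt
    omega
  rw [pvPhrasesFold phrases D0 hndD0 hlenD0, hD0', List.map_map]
  simp [Function.comp_def, pvItemsEmpty]
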